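-- pv_equiv track=rewrite | github.com/Rahul1613/Scalnex-Intelligent-Business-Growth-Networking-Job-Platform | seo/backend/ad_insights_fetcher.py | _calculate_platform_stats
-- ===== SOURCE A (Python) =====
-- from typing import List, Dict, Optional
--
-- def _calculate_platform_stats(ads: List[Dict]) -> Dict:
--     """Calculate statistics by platform"""
--     stats = {}
--     for ad in ads:
--         platform = ad.get('platform', 'Unknown')
--         if platform not in stats:
--             stats[platform] = {
--                 'count': 0,
--                 'active': 0,
--                 'inactive': 0
--             }
--         stats[platform]['count'] += 1
--         if ad.get('status') == 'active':
--             stats[platform]['active'] += 1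
--         else:
--             stats[platform]['inactive'] += 1
--
--     return stats
-- ===== SOURCE B (Python) =====
-- from typing import List, Dict, Optional
--
-- def _calculate_platform_stats(ads: List[Dict]) -> Dict:
--     """Calculate statistics by platform: group ads per platform, then derive the counts."""
--     groups = {}
--     for ad in ads:
--         platform = ad.get('platform', 'Unknown')
--         groups.setdefault(platform, []).append(ad)
--     result = {}
--     for platform, group in groups.items():
--         count = len(group)
--         active = sum(1 for ad in group if ad.get('status') == 'active')
--         result[platform] = {'count': count, 'active': active, 'inactive': count - active}
--     return result
-- ===== Notes on version B (the rewrite author's own statement) =====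
-- stated objective: alternative
-- what changed: Replaces A's single pass that conditionally initialises and increments three counters per ad with a two-pass decomposition: first group the ads per platform (setdefault/append), then derive count = len(group), active by a generator-sum over the group, and inactive by subtraction.
import Mathlib
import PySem

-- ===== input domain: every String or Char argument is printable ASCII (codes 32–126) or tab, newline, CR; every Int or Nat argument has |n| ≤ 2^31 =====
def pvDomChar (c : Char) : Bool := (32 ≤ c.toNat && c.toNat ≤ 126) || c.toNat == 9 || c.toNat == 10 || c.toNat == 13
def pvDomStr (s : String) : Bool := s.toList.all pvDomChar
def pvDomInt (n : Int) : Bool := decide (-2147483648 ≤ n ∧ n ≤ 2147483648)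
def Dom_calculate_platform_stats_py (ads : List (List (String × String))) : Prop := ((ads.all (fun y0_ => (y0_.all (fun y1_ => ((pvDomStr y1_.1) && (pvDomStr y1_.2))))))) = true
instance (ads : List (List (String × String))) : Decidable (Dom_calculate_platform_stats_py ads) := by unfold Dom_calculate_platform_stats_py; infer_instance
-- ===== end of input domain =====

-- B replaces A's one-pass conditional counter updates by a two-pass decomposition (group per
-- platform, then derive count/active and inactive by subtraction); same cost, no speed claim.

-- ad.get(k) / ad.get(k, default) on an ad given as an association list (first match)
def pvAdGet? (ad : List (String × String)) (k : String) : Option String :=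
  (ad.find? (fun q => q.1 == k)).map (·.2)

-- ===== PORT A =====
def pvStepA (stats : PySem.Dict String (PySem.Dict String Int)) (ad : List (String × String)) :
    PySem.Dict String (PySem.Dict String Int) :=
  let platform := (pvAdGet? ad "platform").getD "Unknown"
  -- if platform not in stats: stats[platform] = {'count': 0, 'active': 0, 'inactive': 0}
  let stats := if stats.contains platform then stats
    else stats.insert platform (PySem.Dict.mk [("count", 0), ("active", 0), ("inactive", 0)])
  -- stats[platform]['count'] += 1
  let stats := stats.insert platform
    ((stats.getD platform PySem.Dict.empty).insert "count"
      ((stats.getD platform PySem.Dict.empty).getD "count" 0 + 1))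
  -- if ad.get('status') == 'active' then active += 1 else inactive += 1
  if pvAdGet? ad "status" == some "active" then
    stats.insert platform
      ((stats.getD platform PySem.Dict.empty).insert "active"
        ((stats.getD platform PySem.Dict.empty).getD "active" 0 + 1))
  else
    stats.insert platform
      ((stats.getD platform PySem.Dict.empty).insert "inactive"
        ((stats.getD platform PySem.Dict.empty).getD "inactive" 0 + 1))

def calculate_platform_stats_py (ads : List (List (String × String))) :
    List (String × List (String × Int)) :=
  ((ads.foldl pvStepA PySem.Dict.empty).items).map (fun q => (q.1, q.2.items))

-- ===== PORT B =====
def pvIsActive (ad : List (String × String)) : Bool :=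
  pvAdGet? ad "status" == some "active"

-- groups.setdefault(platform, []).append(ad)  ==  groups[platform] = groups.get(platform, []) + [ad]
def pvStepB (groups : PySem.Dict String (List (List (String × String))))
    (ad : List (String × String)) : PySem.Dict String (List (List (String × String))) :=
  let platform := (pvAdGet? ad "platform").getD "Unknown"
  groups.modify platform [] (· ++ [ad])

def calculate_platform_stats_py_alt (ads : List (List (String × String))) :
    List (String × List (String × Int)) :=
  let groups := ads.foldl pvStepB PySem.Dict.empty
  -- second pass: result[platform] = {'count': count, 'active': active, 'inactive': count - active}
  -- (groups' keys are distinct, so building the result dict appends one entry per group)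
  groups.items.map (fun q =>
    let count : Int := q.2.length
    let active : Int := q.2.countP pvIsActive
    (q.1, [("count", count), ("active", active), ("inactive", count - active)]))

-- ===== PRECONDITION & SPEC =====
def Spec_calculate_platform_stats_py (ads : List (List (String × String))) (out : List (String × List (String × Int))) : Prop := out = calculate_platform_stats_py_alt ads
instance (ads : List (List (String × String))) (out : List (String × List (String × Int))) : Decidable (Spec_calculate_platform_stats_py ads out) := by unfold Spec_calculate_platform_stats_py; infer_instance

-- ===== CLAIM (what is proved, stated in full; the proofs are below) =====
def Claim_equal_calculate_platform_stats_py : Prop := ∀ (ads : List (List (String × String))), Dom_calculate_platform_stats_py ads → Spec_calculate_platform_stats_py ads (calculate_platform_stats_py ads)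

-- ===== LEMMAS AND PROOFS =====

-- the inner statistics dict A maintains for a platform whose group of ads is g
def pvTriple (g : List (List (String × String))) : PySem.Dict String Int :=
  PySem.Dict.mk [("count", (g.length : Int)), ("active", (g.countP pvIsActive : Int)),
    ("inactive", (g.length : Int) - (g.countP pvIsActive : Int))]

-- A's state is B's grouping state with every group replaced by its statistics dict
def pvDmap (d : PySem.Dict String (List (List (String × String)))) :
    PySem.Dict String (PySem.Dict String Int) :=
  PySem.Dict.mk (d.items.map (fun q => (q.1, pvTriple q.2)))

theorem pvDmap_get? (d : PySem.Dict String (List (List (String × String)))) (p : String) :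
    (pvDmap d).get? p = (d.get? p).map pvTriple := by
  simp only [pvDmap, PySem.Dict.get?, List.find?_map]
  have : (fun q : String × PySem.Dict String Int => q.1 == p) ∘
      (fun q : String × List (List (String × String)) => (q.1, pvTriple q.2)) =
      (fun q => q.1 == p) := rfl
  rw [this, Option.map_map]
  cases List.find? (fun q => q.1 == p) d.items <;> rfl

theorem pvDmap_contains (d : PySem.Dict String (List (List (String × String)))) (p : String) :
    (pvDmap d).contains p = d.contains p := by
  rw [PySem.Dict.contains_eq_isSome_get?, PySem.Dict.contains_eq_isSome_get?, pvDmap_get?]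
  cases d.get? p <;> rfl

theorem pvDmap_insert (d : PySem.Dict String (List (List (String × String)))) (p : String)
    (g : List (List (String × String))) :
    (pvDmap d).insert p (pvTriple g) = pvDmap (d.insert p g) := by
  by_cases hc : d.contains p = true
  · apply PySem.Dict.ext
    rw [PySem.Dict.items_insert_of_contains _ _ (by rw [pvDmap_contains]; exact hc)]
    simp only [pvDmap, PySem.Dict.items_insert_of_contains _ _ hc, List.map_map]
    apply List.map_congr_left
    intro q _
    by_cases h : q.1 = p <;> simp [Function.comp, h]
  · apply PySem.Dict.ext
    rw [PySem.Dict.items_insert_of_not_contains _ _ (by rw [pvDmap_contains]; simpa using hc)]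
    simp only [pvDmap, PySem.Dict.items_insert_of_not_contains _ _ (by simpa using hc),
      List.map_append, List.map_cons, List.map_nil]

-- A's three statements on an existing entry turn pvTriple g into pvTriple (g ++ [ad])
theorem pvChain (d : PySem.Dict String (List (List (String × String))))
    (ad : List (String × String)) (p : String) (g : List (List (String × String)))
    (hg : d.get? p = some g) :
    (let stats := pvDmap d
     let stats := stats.insert p
       ((stats.getD p PySem.Dict.empty).insert "count"
         ((stats.getD p PySem.Dict.empty).getD "count" 0 + 1))
     if pvAdGet? ad "status" == some "active" then
       stats.insert p
         ((stats.getD p PySem.Dict.empty).insert "active"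
           ((stats.getD p PySem.Dict.empty).getD "active" 0 + 1))
     else
       stats.insert p
         ((stats.getD p PySem.Dict.empty).insert "inactive"
           ((stats.getD p PySem.Dict.empty).getD "inactive" 0 + 1)))
    = pvDmap (d.insert p (g ++ [ad])) := by
  have hget : (pvDmap d).getD p PySem.Dict.empty = pvTriple g := by
    rw [PySem.Dict.getD_eq_get?_getD, pvDmap_get?, hg]; rfl
  simp only [hget]
  have hcount : (pvTriple g).insert "count" ((pvTriple g).getD "count" 0 + 1) =
      PySem.Dict.mk [("count", (g.length : Int) + 1), ("active", (g.countP pvIsActive : Int)),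
        ("inactive", (g.length : Int) - (g.countP pvIsActive : Int))] := by
    simp [pvTriple, PySem.Dict.insert, PySem.Dict.contains, PySem.Dict.getD, PySem.Dict.get?]
  rw [hcount]
  have hmid : ((pvDmap d).insert p
      (PySem.Dict.mk [("count", (g.length : Int) + 1), ("active", (g.countP pvIsActive : Int)),
        ("inactive", (g.length : Int) - (g.countP pvIsActive : Int))])).getD p PySem.Dict.empty =
      PySem.Dict.mk [("count", (g.length : Int) + 1), ("active", (g.countP pvIsActive : Int)),
        ("inactive", (g.length : Int) - (g.countP pvIsActive : Int))] :=
    PySem.Dict.getD_insert_self _ _ _ _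
  by_cases hact : pvIsActive ad = true
  · simp only [pvIsActive] at hact
    simp only [hact, if_true, hmid, PySem.Dict.insert_insert_self]
    rw [← pvDmap_insert]
    congr 1
    have h2 : (PySem.Dict.mk [("count", (g.length : Int) + 1),
        ("active", (g.countP pvIsActive : Int)),
        ("inactive", (g.length : Int) - (g.countP pvIsActive : Int))]).insert "active"
          ((PySem.Dict.mk [("count", (g.length : Int) + 1),
            ("active", (g.countP pvIsActive : Int)),
            ("inactive", (g.length : Int) - (g.countP pvIsActive : Int))]).getD "active" 0 + 1) =
        PySem.Dict.mk [("count", (g.length : Int) + 1), ("active", (g.countP pvIsActive : Int) + 1),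
          ("inactive", (g.length : Int) - (g.countP pvIsActive : Int))] := by
      simp [PySem.Dict.insert, PySem.Dict.contains, PySem.Dict.getD, PySem.Dict.get?]
    rw [h2]
    have hcp : (g ++ [ad]).countP pvIsActive = g.countP pvIsActive + 1 := by
      simp [List.countP_append, pvIsActive, hact]
    apply PySem.Dict.ext
    simp only [pvTriple, hcp, List.length_append, List.length_cons, List.length_nil,
      List.cons.injEq, Prod.mk.injEq, and_true, true_and]
    push_cast
    omega
  · simp only [pvIsActive] at hact
    simp only [hact, if_false, hmid, PySem.Dict.insert_insert_self, Bool.false_eq_true]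
    rw [← pvDmap_insert]
    congr 1
    have h2 : (PySem.Dict.mk [("count", (g.length : Int) + 1),
        ("active", (g.countP pvIsActive : Int)),
        ("inactive", (g.length : Int) - (g.countP pvIsActive : Int))]).insert "inactive"
          ((PySem.Dict.mk [("count", (g.length : Int) + 1),
            ("active", (g.countP pvIsActive : Int)),
            ("inactive", (g.length : Int) - (g.countP pvIsActive : Int))]).getD "inactive" 0 + 1) =
        PySem.Dict.mk [("count", (g.length : Int) + 1), ("active", (g.countP pvIsActive : Int)),
          ("inactive", (g.length : Int) - (g.countP pvIsActive : Int) + 1)] := by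
      simp [PySem.Dict.insert, PySem.Dict.contains, PySem.Dict.getD, PySem.Dict.get?]
    rw [h2]
    have hcp : (g ++ [ad]).countP pvIsActive = g.countP pvIsActive := by
      simp [List.countP_append, pvIsActive, hact]
    apply PySem.Dict.ext
    simp only [pvTriple, hcp, List.length_append, List.length_cons, List.length_nil,
      List.cons.injEq, Prod.mk.injEq, and_true, true_and]
    push_cast
    omega

theorem pvStep_eq (d : PySem.Dict String (List (List (String × String))))
    (ad : List (String × String)) :
    pvStepA (pvDmap d) ad = pvDmap (pvStepB d ad) := by
  unfold pvStepA pvStepB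
  simp only [pvDmap_contains]
  by_cases hc : d.contains ((pvAdGet? ad "platform").getD "Unknown") = true
  · obtain ⟨g, hg⟩ : ∃ g, d.get? ((pvAdGet? ad "platform").getD "Unknown") = some g := by
      rw [PySem.Dict.contains_eq_isSome_get?] at hc
      exact Option.isSome_iff_exists.mp hc
    simp only [hc, if_true]
    have hmod : d.modify ((pvAdGet? ad "platform").getD "Unknown") [] (· ++ [ad]) =
        d.insert ((pvAdGet? ad "platform").getD "Unknown") (g ++ [ad]) := by
      rw [PySem.Dict.modify, PySem.Dict.getD_eq_get?_getD, hg]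
      rfl
    rw [hmod]
    exact pvChain d ad _ g hg
  · have hcf : d.contains ((pvAdGet? ad "platform").getD "Unknown") = false := by
      simpa using hc
    have hnone : d.get? ((pvAdGet? ad "platform").getD "Unknown") = none := by
      rw [PySem.Dict.contains_eq_isSome_get?] at hcf
      simpa using hcf
    simp only [hcf, Bool.false_eq_true, if_false]
    have h0 : (PySem.Dict.mk [("count", 0), ("active", 0), ("inactive", 0)] :
        PySem.Dict String Int) = pvTriple [] := rfl
    rw [h0, pvDmap_insert]
    have hg : (d.insert ((pvAdGet? ad "platform").getD "Unknown") []).get?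
        ((pvAdGet? ad "platform").getD "Unknown") = some [] :=
      PySem.Dict.get?_insert_self _ _ _
    have hmod : d.modify ((pvAdGet? ad "platform").getD "Unknown") [] (· ++ [ad]) =
        (d.insert ((pvAdGet? ad "platform").getD "Unknown") []).insert
          ((pvAdGet? ad "platform").getD "Unknown") ([] ++ [ad]) := by
      rw [PySem.Dict.insert_insert_self, PySem.Dict.modify, PySem.Dict.getD_eq_get?_getD, hnone]
      rfl
    rw [hmod]
    exact pvChain (d.insert ((pvAdGet? ad "platform").getD "Unknown") []) ad _ [] hg

theorem pvMain (ads : List (List (String × String)))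
    (d : PySem.Dict String (List (List (String × String)))) :
    ads.foldl pvStepA (pvDmap d) = pvDmap (ads.foldl pvStepB d) := by
  induction ads generalizing d with
  | nil => rfl
  | cons ad rest ih =>
    simp only [List.foldl_cons, pvStep_eq, ih]

-- ===== VERDICT (by name: the statement is the Claim_ definition above) =====
theorem calculate_platform_stats_py_spec : Claim_equal_calculate_platform_stats_py := by
  intro ads _
  unfold Spec_calculate_platform_stats_py
  unfold calculate_platform_stats_py calculate_platform_stats_py_alt
  have h0 : (PySem.Dict.empty : PySem.Dict String (PySem.Dict String Int)) =
      pvDmap PySem.Dict.empty := rfl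
  rw [h0, pvMain]
  simp only [pvDmap, List.map_map]
  rfl
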